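-- pv_equiv track=rewrite | github.com/doancuong357/KTTMDT | bt11.py | longest_non_increasing_subsequence
-- ===== SOURCE A (Python) =====
-- def longest_non_increasing_subsequence(arr):
--     if not arr:
--         return 0
--
--     max_len = 1
--     current_len = 1
--
--     for i in range(1, len(arr)):
--         if arr[i] <= arr[i - 1]:
--             current_len += 1
--             if current_len > max_len:
--                 max_len = current_len
--         else:
--             current_len = 1
--
--     return max_len
-- ===== SOURCE B (Python) =====
-- def longest_non_increasing_subsequence(arr):
--     if not arr:
--         return 0
--     bounds = [0] + [i for i in range(1, len(arr)) if arr[i] > arr[i - 1]] + [len(arr)]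
--     return max(b - a for a, b in zip(bounds, bounds[1:]))
-- ===== Notes on version B (the rewrite author's own statement) =====
-- stated objective: alternative
-- what changed: B first materialises the list of run-start boundaries (positions where the array strictly increases, plus 0 and len) and then takes the maximum gap between consecutive boundaries in a second pass, instead of A's single online loop maintaining a current/max counter pair.
import Mathlib
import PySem

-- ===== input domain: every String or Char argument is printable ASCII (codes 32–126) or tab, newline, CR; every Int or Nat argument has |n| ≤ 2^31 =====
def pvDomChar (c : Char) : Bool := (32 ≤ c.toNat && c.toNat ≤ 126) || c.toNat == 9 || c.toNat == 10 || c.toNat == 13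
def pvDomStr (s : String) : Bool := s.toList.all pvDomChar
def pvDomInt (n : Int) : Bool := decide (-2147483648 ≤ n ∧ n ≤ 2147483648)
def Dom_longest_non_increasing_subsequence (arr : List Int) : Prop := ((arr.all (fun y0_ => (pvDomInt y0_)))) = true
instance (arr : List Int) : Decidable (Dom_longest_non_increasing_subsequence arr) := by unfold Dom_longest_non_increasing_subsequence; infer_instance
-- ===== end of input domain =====

-- B replaces A's online current/max counter by a staged computation: materialise the
-- run-start boundary positions first, then take the maximum gap between consecutive boundaries.


-- ===== PORT A =====
-- literal port: `for i in range(1, len(arr))` is a foldl over pyRange; arr[i] is pyGetD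
-- (every index the loop visits is in range, so the default 0 is never used)
def longest_non_increasing_subsequence (arr : List Int) : Int :=
  if arr = [] then 0
  else
    ((PySem.List.pyRange 1 (arr.length : Int) 1).foldl
      (fun (s : Int × Int) i =>
        if PySem.List.pyGetD arr i 0 ≤ PySem.List.pyGetD arr (i - 1) 0 then
          (if s.2 + 1 > s.1 then s.2 + 1 else s.1, s.2 + 1)
        else (s.1, 1))
      (1, 1)).1

-- ===== PORT B =====
-- literal port of Source B: bounds = [0] + [i for i in range(1,len) if arr[i] > arr[i-1]] + [len],
-- gaps via zip(bounds, bounds[1:]), then max(...); bounds always has ≥ 2 elements when arr ≠ [],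
-- so the gap list is nonempty and max?'s none branch (Python's ValueError) is unreachable.
def longest_non_increasing_subsequence_alt (arr : List Int) : Int :=
  if arr = [] then 0
  else
    let bounds : List Int :=
      [0] ++ (PySem.List.pyRange 1 (arr.length : Int) 1).filter
        (fun i => PySem.List.pyGetD arr i 0 > PySem.List.pyGetD arr (i - 1) 0) ++ [(arr.length : Int)]
    let gaps : List Int :=
      (bounds.zip (PySem.List.slice bounds (some 1) none)).map (fun p => p.2 - p.1)
    (PySem.List.max? gaps (fun y => y)).getD 0

-- ===== PRECONDITION & SPEC =====
def Spec_longest_non_increasing_subsequence (arr : List Int) (out : Int) : Prop := out = longest_non_increasing_subsequence_alt arr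
instance (arr : List Int) (out : Int) : Decidable (Spec_longest_non_increasing_subsequence arr out) := by unfold Spec_longest_non_increasing_subsequence; infer_instance

-- ===== CLAIM (what is proved, stated in full; the proofs are below) =====
def Claim_equal_longest_non_increasing_subsequence : Prop := ∀ (arr : List Int), Dom_longest_non_increasing_subsequence arr → Spec_longest_non_increasing_subsequence arr (longest_non_increasing_subsequence arr)

-- ===== LEMMAS AND PROOFS =====

-- proof-side names for the two ports' inner computations
def aFoldE (arr : List Int) : Int × Int :=
  (PySem.List.pyRange 1 (arr.length : Int) 1).foldl
    (fun (s : Int × Int) i =>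
      if PySem.List.pyGetD arr i 0 ≤ PySem.List.pyGetD arr (i - 1) 0 then
        (if s.2 + 1 > s.1 then s.2 + 1 else s.1, s.2 + 1)
      else (s.1, 1))
    (1, 1)

def coreE (arr : List Int) : List Int :=
  (PySem.List.pyRange 1 (arr.length : Int) 1).filter
    (fun i => PySem.List.pyGetD arr i 0 > PySem.List.pyGetD arr (i - 1) 0)

def boundsE (arr : List Int) : List Int := [0] ++ coreE arr ++ [(arr.length : Int)]

def gapsOf (l : List Int) : List Int :=
  (l.zip (PySem.List.slice l (some 1) none)).map (fun p => p.2 - p.1)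

theorem alt_eq (arr : List Int) :
    longest_non_increasing_subsequence_alt arr =
      if arr = [] then 0 else (PySem.List.max? (gapsOf (boundsE arr)) (fun y => y)).getD 0 := rfl

theorem a_eq (arr : List Int) :
    longest_non_increasing_subsequence arr = if arr = [] then 0 else (aFoldE arr).1 := rfl

-- xs[i] on a strict prefix of an appended list
theorem pyGetD_append_lt (l : List Int) (z : Int) (i : Int) (h0 : 0 ≤ i) (h1 : i < (l.length : Int)) :
    PySem.List.pyGetD (l ++ [z]) i 0 = PySem.List.pyGetD l i 0 := by
  rw [PySem.List.pyGetD_eq_getElem (l ++ [z]) 0 h0 (by simp; omega),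
      PySem.List.pyGetD_eq_getElem l 0 h0 h1,
      List.getElem_append_left (by omega)]

theorem len_append_cast (l : List Int) (z : Int) :
    (((l ++ [z]).length : Nat) : Int) = (l.length : Int) + 1 := by simp

-- the boundary-comprehension of l ++ [z] in terms of that of l
theorem coreE_append (l : List Int) (z : Int) (hl : l ≠ []) :
    coreE (l ++ [z]) =
      coreE l ++ (if z > l.getLast hl then [(l.length : Int)] else []) := by
  have hlen : 1 ≤ (l.length : Int) := by
    have := List.length_pos_of_ne_nil hl; omega
  unfold coreE
  rw [len_append_cast, PySem.List.pyRange_one_succ_right hlen, List.filter_append]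
  congr 1
  · apply List.filter_congr
    intro i hi
    rcases PySem.List.mem_pyRange_one.mp hi with ⟨hi1, hi2⟩
    rw [pyGetD_append_lt l z i (by omega) hi2, pyGetD_append_lt l z (i - 1) (by omega) (by omega)]
  · have h1 : PySem.List.pyGetD (l ++ [z]) ((l.length : Int)) 0 = z := by
      rw [PySem.List.pyGetD_eq_getElem (l ++ [z]) 0 (by omega) (by simp)]
      simp
    have h2 : PySem.List.pyGetD (l ++ [z]) ((l.length : Int) - 1) 0 = l.getLast hl := by
      rw [pyGetD_append_lt l z _ (by omega) (by omega),
          PySem.List.pyGetD_eq_getElem l 0 (by omega) (by omega)]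
      rw [List.getLast_eq_getElem]
      congr 1
      omega
    simp only [List.filter, h1, h2]
    split <;> rename_i h
    · rw [if_pos (by simpa using h)]
    · rw [if_neg (by simpa using h)]

-- A's fold on l ++ [z] is one step after A's fold on l
theorem aFoldE_append (l : List Int) (z : Int) (hl : l ≠ []) :
    aFoldE (l ++ [z]) =
      (if z ≤ l.getLast hl then
        (if (aFoldE l).2 + 1 > (aFoldE l).1 then (aFoldE l).2 + 1 else (aFoldE l).1, (aFoldE l).2 + 1)
      else ((aFoldE l).1, 1)) := by
  have hlen : 1 ≤ (l.length : Int) := by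
    have := List.length_pos_of_ne_nil hl; omega
  unfold aFoldE
  rw [len_append_cast, PySem.List.pyRange_one_succ_right hlen, List.foldl_append]
  have hbody :
      List.foldl
        (fun (s : Int × Int) i =>
          if PySem.List.pyGetD (l ++ [z]) i 0 ≤ PySem.List.pyGetD (l ++ [z]) (i - 1) 0 then
            (if s.2 + 1 > s.1 then s.2 + 1 else s.1, s.2 + 1)
          else (s.1, 1)) (1, 1) (PySem.List.pyRange 1 (l.length : Int) 1)
      = List.foldl
        (fun (s : Int × Int) i =>
          if PySem.List.pyGetD l i 0 ≤ PySem.List.pyGetD l (i - 1) 0 then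
            (if s.2 + 1 > s.1 then s.2 + 1 else s.1, s.2 + 1)
          else (s.1, 1)) (1, 1) (PySem.List.pyRange 1 (l.length : Int) 1) := by
    apply PySem.List.foldl_congr_mem
    intro acc i hi
    rcases PySem.List.mem_pyRange_one.mp hi with ⟨hi1, hi2⟩
    rw [pyGetD_append_lt l z i (by omega) hi2, pyGetD_append_lt l z (i - 1) (by omega) (by omega)]
  rw [hbody]
  have h1 : PySem.List.pyGetD (l ++ [z]) ((l.length : Int)) 0 = z := by
    rw [PySem.List.pyGetD_eq_getElem (l ++ [z]) 0 (by omega) (by simp)]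
    simp
  have h2 : PySem.List.pyGetD (l ++ [z]) ((l.length : Int) - 1) 0 = l.getLast hl := by
    rw [pyGetD_append_lt l z _ (by omega) (by omega),
        PySem.List.pyGetD_eq_getElem l 0 (by omega) (by omega)]
    rw [List.getLast_eq_getElem]
    congr 1
    omega
  simp only [List.foldl_cons, List.foldl_nil, h1, h2]

-- consecutive gaps of a list with one element appended
theorem gapsOf_append (l : List Int) (a : Int) (hl : l ≠ []) :
    gapsOf (l ++ [a]) = gapsOf l ++ [a - l.getLast?.getD 0] := by
  induction l with
  | nil => exact absurd rfl hl
  | cons x t ih =>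
    cases t with
    | nil => simp [gapsOf, PySem.List.slice_from_one]
    | cons y s =>
      have h' : (y :: s) ≠ [] := by simp
      have := ih h'
      simp only [gapsOf, PySem.List.slice_from_one] at this ⊢
      simp only [List.cons_append, List.tail_cons, List.zip_cons_cons, List.map_cons] at this ⊢
      rw [this]
      simp

theorem max?_append_singleton (t : List Int) (a : Int) :
    PySem.List.max? (t ++ [a]) (fun y => y) =
      some (match PySem.List.max? t (fun y => y) with
            | none => a
            | some m => max m a) := by
  cases t with
  | nil =>
    have h0 : PySem.List.max? ([] : List Int) (fun y => y) = none := by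
      rw [PySem.List.max?_eq_none_iff]
    rw [List.nil_append, h0, PySem.List.max?_id_cons]
    simp
  | cons x s =>
    rw [List.cons_append, PySem.List.max?_id_cons, PySem.List.max?_id_cons]
    simp [List.foldl_append]

theorem max_if_lemma (md c m : Int) (h2 : c ≤ m)
    (hold : (if md ≤ c then c else md) = m) :
    (if md ≤ c + 1 then c + 1 else md) = if c + 1 > m then c + 1 else m := by
  split_ifs at hold ⊢ <;> omega

theorem none_lemma (c m : Int) (hold : c = m) :
    c + 1 = if c + 1 > m then c + 1 else m := by
  split <;> omega

-- the invariant: for nonempty arr, the gap list ends in A's current counter and its max is A's max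
theorem invariant (arr : List Int) (h : arr ≠ []) :
    1 ≤ (aFoldE arr).2 ∧ (aFoldE arr).2 ≤ (aFoldE arr).1 ∧
    ∃ d : List Int,
      gapsOf (boundsE arr) = d ++ [(aFoldE arr).2] ∧
      PySem.List.max? (d ++ [(aFoldE arr).2]) (fun y => y) = some (aFoldE arr).1 := by
  induction arr using List.reverseRecOn with
  | nil => exact absurd rfl h
  | append_singleton l z ih =>
    by_cases hl : l = []
    · subst hl
      simp only [List.nil_append]
      have hA : aFoldE [z] = (1, 1) := by
        unfold aFoldE
        norm_num [PySem.List.pyRange_one_eq_nil]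
      have hC : coreE [z] = [] := by
        unfold coreE
        norm_num [PySem.List.pyRange_one_eq_nil]
      rw [hA]
      refine ⟨le_rfl, le_rfl, [], ?_, ?_⟩
      · simp [gapsOf, boundsE, hC, PySem.List.slice_from_one]
      · rw [List.nil_append, PySem.List.max?_id_cons]
        simp
    · obtain ⟨hc1, hcm, d, hgaps, hmax⟩ := ih hl
      have hlen : 1 ≤ (l.length : Int) := by
        have := List.length_pos_of_ne_nil hl; omega
      have hAF := aFoldE_append l z hl
      have hcore := coreE_append l z hl
      set m := (aFoldE l).1 with hm
      set c := (aFoldE l).2 with hc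
      clear_value m c
      have hb : boundsE l = (0 :: coreE l) ++ [(l.length : Int)] := by
        simp [boundsE]
      have hb0ne : (0 :: coreE l) ≠ [] := by simp
      have hgl : gapsOf (boundsE l)
          = gapsOf (0 :: coreE l) ++ [(l.length : Int) - (0 :: coreE l).getLast?.getD 0] := by
        rw [hb, gapsOf_append _ _ hb0ne]
      by_cases hz : z ≤ l.getLast hl
      · -- run continues: last boundary moves from len l to len l + 1
        rw [hAF, if_pos hz]
        have hbnew : boundsE (l ++ [z]) = (0 :: coreE l) ++ [(l.length : Int) + 1] := by
          simp only [boundsE, hcore, len_append_cast]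
          rw [if_neg (by omega)]
          simp
        have hgnew : gapsOf (boundsE (l ++ [z]))
            = gapsOf (0 :: coreE l) ++ [(l.length : Int) + 1 - (0 :: coreE l).getLast?.getD 0] := by
          rw [hbnew, gapsOf_append _ _ hb0ne]
        have hdec : d = gapsOf (0 :: coreE l) ∧
            c = (l.length : Int) - (0 :: coreE l).getLast?.getD 0 := by
          have heq := hgaps.symm.trans hgl
          have h2 := List.append_inj' heq rfl
          exact ⟨h2.1, by simpa using h2.2⟩
        have hlast : (l.length : Int) + 1 - (0 :: coreE l).getLast?.getD 0 = c + 1 := by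
          rw [hdec.2]; ring
        refine ⟨by omega, ?_, d, ?_, ?_⟩
        · dsimp only
          split <;> omega
        · dsimp only
          rw [hgnew, hlast, hdec.1]
        · dsimp only
          rw [max?_append_singleton]
          have hold := hmax
          rw [max?_append_singleton] at hold
          cases hd : PySem.List.max? d (fun y => y) with
          | none =>
            rw [hd] at hold
            dsimp only at hold ⊢
            simp only [Option.some.injEq] at hold ⊢
            exact none_lemma c m hold
          | some md =>
            rw [hd] at hold
            dsimp only at hold ⊢
            simp only [Option.some.injEq] at hold ⊢
            simp only [max_def] at hold ⊢
            exact max_if_lemma md c m hcm hold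
      · -- new run starts: a boundary at len l is appended, contributing gap 1
        rw [hAF, if_neg hz]
        have hbnew : boundsE (l ++ [z]) = boundsE l ++ [(l.length : Int) + 1] := by
          simp only [boundsE, hcore, len_append_cast]
          rw [if_pos (by omega)]
          simp
        have hblne : boundsE l ≠ [] := by simp [boundsE]
        have hblast : (boundsE l).getLast?.getD 0 = (l.length : Int) := by
          rw [hb, show (0 : Int) :: coreE l ++ [(l.length : Int)]
              = ((0 : Int) :: coreE l) ++ [(l.length : Int)] from rfl,
            List.getLast?_concat]
          rfl
        have hgnew : gapsOf (boundsE (l ++ [z])) = gapsOf (boundsE l) ++ [1] := by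
          rw [hbnew, gapsOf_append _ _ hblne, hblast]
          norm_num
        refine ⟨le_rfl, by omega, d ++ [c], ?_, ?_⟩
        · dsimp only
          rw [hgnew, hgaps]
        · dsimp only
          rw [max?_append_singleton, hmax]
          dsimp only
          simp only [Option.some.injEq]
          exact max_eq_left (by omega)

-- ===== VERDICT (by name: the statement is the Claim_ definition above) =====
theorem longest_non_increasing_subsequence_spec : Claim_equal_longest_non_increasing_subsequence := by
  intro arr _
  unfold Spec_longest_non_increasing_subsequence
  rw [a_eq, alt_eq]
  by_cases h : arr = []
  · simp [h]
  · obtain ⟨_, _, d, hgaps, hmax⟩ := invariant arr h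
    rw [if_neg h, if_neg h, hgaps, hmax]
    rfl
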